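-- pv_equiv track=rewrite | github.com/Sapfik/Practise-Python | kata6/take_number.py | split_nums
-- ===== SOURCE A (Python) =====
-- def split_nums(n):
--     digits = []
--     count = 1
--     array = []
--     while n > 0:
--         digits.append((n % 10))
--         n = (n - n % 10) // 10
--     for i in digits[::-1]:
--         array.append(i**count)
--         count += 1
--     return array
-- ===== SOURCE B (Python) =====
-- def num_digits(m):
--     return 0 if m <= 0 else 1 + num_digits(m // 10)
--
--
-- def split_nums(n):
--     if n <= 0:
--         return []
--     k = num_digits(n)
--     return [((n // 10 ** (k - i)) % 10) ** i for i in range(1, k + 1)]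
-- ===== Notes on version B (the rewrite author's own statement) =====
-- stated objective: alternative
-- what changed: Replaces A's two-pass scheme (extract digits least-significant-first into a list, reverse it, then accumulate powers) with a digit count followed by a direct positional formula that extracts each digit most-significant-first by quotient-and-remainder with the matching power of ten and raises it to its position, building no intermediate digit list and doing no reversal.
import Mathlib
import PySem

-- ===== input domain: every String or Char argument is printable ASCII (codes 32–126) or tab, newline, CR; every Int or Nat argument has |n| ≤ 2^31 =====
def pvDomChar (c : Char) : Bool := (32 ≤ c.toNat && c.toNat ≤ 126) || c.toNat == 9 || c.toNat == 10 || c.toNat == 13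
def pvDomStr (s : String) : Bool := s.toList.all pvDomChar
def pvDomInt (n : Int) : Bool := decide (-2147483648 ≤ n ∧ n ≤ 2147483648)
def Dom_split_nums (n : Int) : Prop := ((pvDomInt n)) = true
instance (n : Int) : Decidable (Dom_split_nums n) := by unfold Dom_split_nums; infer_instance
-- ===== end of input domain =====

-- B replaces A's extract-LSB-then-reverse two-pass scheme by a digit count plus a direct
-- positional formula ((n // 10**(k-i)) % 10) ** i mapped over range(1, k+1) (objective: alternative).

-- ===== PORT A =====
-- termination helper for A's while loop (cited by decreasing_by)
theorem pvWhileDec (n : Int) (h : 0 < n) :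
    (PySem.Int.floordiv (n - PySem.Int.mod n 10) 10).toNat < n.toNat := by
  rw [PySem.Int.mod_eq_emod_of_pos (by norm_num : (0:Int) < 10),
      PySem.Int.floordiv_eq_ediv_of_pos (by norm_num : (0:Int) < 10)]
  omega

-- while n > 0: digits.append(n % 10); n = (n - n % 10) // 10
def splitNumsWhile (n : Int) (digits : List Int) : List Int :=
  if h : 0 < n then
    splitNumsWhile (PySem.Int.floordiv (n - PySem.Int.mod n 10) 10)
      (digits ++ [PySem.Int.mod n 10])
  else digits
termination_by n.toNat
decreasing_by exact pvWhileDec n h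

-- for i in digits[::-1]: array.append(i**count); count += 1
-- (i**count always has count ≥ 1 along A's execution, ported as i ^ count.toNat)
def splitNumsFor : List Int → Int → List Int → List Int
  | [], _, array => array
  | i :: rest, count, array => splitNumsFor rest (count + 1) (array ++ [i ^ count.toNat])

-- digits[::-1] ported as List.reverse (exact for a full step -1 slice)
def split_nums (n : Int) : List Int :=
  splitNumsFor (splitNumsWhile n []).reverse 1 []

-- ===== PORT B =====
def num_digits (m : Int) : Int :=
  if 0 < m then 1 + num_digits (PySem.Int.floordiv m 10) else 0
termination_by m.toNat
decreasing_by
  rw [PySem.Int.floordiv_eq_ediv_of_pos (by norm_num : (0:Int) < 10)]; omega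

-- 10 ** (k - i) and d ** i always have nonnegative exponents here, ported with .toNat
def split_nums_alt (n : Int) : List Int :=
  if n ≤ 0 then []
  else
    let k := num_digits n
    (PySem.List.pyRange 1 (k + 1) 1).map
      (fun i => (PySem.Int.mod (PySem.Int.floordiv n (10 ^ (k - i).toNat)) 10) ^ i.toNat)

-- ===== PRECONDITION & SPEC =====
def Spec_split_nums (n : Int) (out : List Int) : Prop := out = split_nums_alt n
instance (n : Int) (out : List Int) : Decidable (Spec_split_nums n out) := by unfold Spec_split_nums; infer_instance

-- ===== CLAIM (what is proved, stated in full; the proofs are below) =====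
def Claim_equal_split_nums : Prop := ∀ (n : Int), Dom_split_nums n → Spec_split_nums n (split_nums n)

-- ===== LEMMAS AND PROOFS =====

theorem floordiv_sub_mod (n : Int) :
    PySem.Int.floordiv (n - PySem.Int.mod n 10) 10 = PySem.Int.floordiv n 10 := by
  rw [PySem.Int.mod_eq_emod_of_pos (by norm_num : (0:Int) < 10)]
  rw [PySem.Int.floordiv_eq_ediv_of_pos (by norm_num : (0:Int) < 10),
      PySem.Int.floordiv_eq_ediv_of_pos (by norm_num : (0:Int) < 10)]
  omega

theorem splitNumsWhile_acc (n : Int) (digits : List Int) :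
    splitNumsWhile n digits = digits ++ splitNumsWhile n [] := by
  by_cases h : 0 < n
  · conv_lhs => rw [splitNumsWhile]
    conv_rhs => rw [splitNumsWhile]
    simp only [h, dite_true]
    rw [splitNumsWhile_acc (PySem.Int.floordiv (n - PySem.Int.mod n 10) 10)
          (digits ++ [PySem.Int.mod n 10]),
        splitNumsWhile_acc (PySem.Int.floordiv (n - PySem.Int.mod n 10) 10)
          ([] ++ [PySem.Int.mod n 10])]
    simp
  · conv_lhs => rw [splitNumsWhile]
    conv_rhs => rw [splitNumsWhile]
    simp [h]
termination_by n.toNat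
decreasing_by all_goals exact pvWhileDec n h

theorem splitNumsWhile_pos (n : Int) (h : 0 < n) :
    splitNumsWhile n [] =
      PySem.Int.mod n 10 :: splitNumsWhile (PySem.Int.floordiv n 10) [] := by
  rw [splitNumsWhile]
  simp only [h, dite_true, floordiv_sub_mod]
  rw [splitNumsWhile_acc]
  simp

theorem splitNumsWhile_nonpos (n : Int) (h : ¬ 0 < n) :
    splitNumsWhile n [] = [] := by
  rw [splitNumsWhile]; simp [h]

theorem num_digits_nonneg (n : Int) : 0 ≤ num_digits n := by
  induction n using num_digits.induct with
  | case1 n h ih => rw [num_digits]; simp only [h, if_true]; omega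
  | case2 n h => rw [num_digits]; simp [h]

theorem length_splitNumsWhile (n : Int) :
    ((splitNumsWhile n []).length : Int) = num_digits n := by
  induction n using num_digits.induct with
  | case1 n h ih =>
    rw [splitNumsWhile_pos n h, num_digits]
    simp only [h, if_true, List.length_cons]
    push_cast
    omega
  | case2 n h =>
    rw [splitNumsWhile_nonpos n h, num_digits]
    simp [h]

theorem splitNumsFor_append (xs ys : List Int) (c : Int) (arr : List Int) :
    splitNumsFor (xs ++ ys) c arr =
      splitNumsFor ys (c + xs.length) (splitNumsFor xs c arr) := by
  induction xs generalizing c arr with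
  | nil => simp [splitNumsFor]
  | cons x xs ih =>
    simp only [List.cons_append, splitNumsFor, ih, List.length_cons]
    congr 1
    push_cast
    ring

theorem ediv_pow_succ (n : Int) (e : Nat) :
    n / 10 / (10 ^ e) = n / 10 ^ (e + 1) := by
  rw [Int.ediv_ediv_of_nonneg (by positivity)]
  rw [pow_succ']

-- MAIN invariant: running A's for-loop over the MSB digit list of n, starting at
-- exponent c+1, appends exactly B's positional formula shifted by c.
theorem floordiv_ten_nonneg (n : Int) (hn : 0 ≤ n) : 0 ≤ PySem.Int.floordiv n 10 := by
  rw [PySem.Int.floordiv_eq_ediv_of_pos (by norm_num : (0:Int) < 10)]; omega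

theorem floordiv_one (n : Int) : PySem.Int.floordiv n 1 = n := by
  rw [PySem.Int.floordiv_eq_ediv_of_pos (by norm_num : (0:Int) < 1)]; omega

theorem main_inv (n : Int) (hn : 0 ≤ n) :
    ∀ c : Int, 0 ≤ c → ∀ arr : List Int,
      splitNumsFor (splitNumsWhile n []).reverse (c + 1) arr =
        arr ++ (PySem.List.pyRange (c + 1) (c + 1 + num_digits n) 1).map
          (fun i => (PySem.Int.mod
              (PySem.Int.floordiv n (10 ^ (c + num_digits n - i).toNat)) 10) ^ i.toNat) := by
  intro c hc arr
  by_cases h : 0 < n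
  · have hm0 : 0 ≤ PySem.Int.floordiv n 10 := floordiv_ten_nonneg n hn
    have hK : num_digits n = 1 + num_digits (PySem.Int.floordiv n 10) := by
      rw [num_digits]; simp [h]
    have hKm0 : 0 ≤ num_digits (PySem.Int.floordiv n 10) := num_digits_nonneg _
    rw [splitNumsWhile_pos n h, List.reverse_cons, splitNumsFor_append,
        main_inv (PySem.Int.floordiv n 10) hm0 c hc arr]
    have hlen : (((splitNumsWhile (PySem.Int.floordiv n 10) []).reverse.length : Int)) =
        num_digits (PySem.Int.floordiv n 10) := by
      rw [List.length_reverse]; exact length_splitNumsWhile _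
    have hsplit : PySem.List.pyRange (c + 1) (c + 1 + num_digits n) 1 =
        PySem.List.pyRange (c + 1) (c + 1 + num_digits (PySem.Int.floordiv n 10)) 1 ++
          [c + 1 + num_digits (PySem.Int.floordiv n 10)] := by
      have : c + 1 + num_digits n = (c + 1 + num_digits (PySem.Int.floordiv n 10)) + 1 := by
        rw [hK]; ring
      rw [this, PySem.List.pyRange_one_succ_right (by omega)]
    rw [hsplit, List.map_append]
    simp only [splitNumsFor, List.map_cons, List.map_nil]
    rw [List.append_assoc]
    congr 1
    congr 1
    · -- the first Km elements agree
      apply List.map_congr_left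
      intro i hi
      rw [PySem.List.mem_pyRange_one] at hi
      have he : (c + num_digits n - i).toNat = (c + num_digits (PySem.Int.floordiv n 10) - i).toNat + 1 := by
        rw [hK]; omega
      rw [he]
      congr 2
      rw [PySem.Int.floordiv_eq_ediv_of_pos (by positivity : (0:Int) < 10 ^ ((c + num_digits (PySem.Int.floordiv n 10) - i).toNat + 1)),
          PySem.Int.floordiv_eq_ediv_of_pos (by positivity : (0:Int) < 10 ^ (c + num_digits (PySem.Int.floordiv n 10) - i).toNat),
          PySem.Int.floordiv_eq_ediv_of_pos (by norm_num : (0:Int) < 10)]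
      exact ediv_pow_succ n _
    · -- the appended last element agrees
      congr 1
      have he0 : (c + num_digits n - (c + 1 + num_digits (PySem.Int.floordiv n 10))).toNat = 0 := by
        rw [hK]; omega
      rw [he0]
      have hc1 : c + 1 + ((splitNumsWhile (PySem.Int.floordiv n 10) []).reverse.length : Int) =
          c + 1 + num_digits (PySem.Int.floordiv n 10) := by rw [hlen]
      rw [hc1, pow_zero, floordiv_one]
  · have h0 : n = 0 := by omega
    rw [splitNumsWhile_nonpos n h]
    have : num_digits n = 0 := by rw [num_digits]; simp [h]
    rw [this]
    rw [PySem.List.pyRange_one_eq_nil (by omega)]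
    simp [splitNumsFor]
termination_by n.toNat
decreasing_by
  rw [PySem.Int.floordiv_eq_ediv_of_pos (by norm_num : (0:Int) < 10)]; omega

theorem split_nums_eq (n : Int) : split_nums n = split_nums_alt n := by
  by_cases h : n ≤ 0
  · rw [split_nums, split_nums_alt, splitNumsWhile_nonpos n (by omega)]
    simp [splitNumsFor, h]
  · rw [split_nums, split_nums_alt]
    simp only [h, if_false]
    have := main_inv n (by omega) 0 le_rfl []
    simp only [zero_add, List.nil_append] at this
    rw [add_comm (1 : Int) (num_digits n)] at this
    exact this

-- ===== VERDICT (by name: the statement is the Claim_ definition above) =====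
theorem split_nums_spec : Claim_equal_split_nums := by
  intro n _
  exact split_nums_eq n
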